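-- pv_equiv track=rewrite | github.com/koremp/algorithm | boj/class3/1074.py | dim
-- ===== SOURCE A (Python) =====
-- def dim(n, r, c, count):
--     if n <= 0:
--         return count
--
--     divide = (2 ** (n - 1)) ** 2
--
--     if r < 2 ** (n - 1):
--         if c < 2 ** (n - 1):
--             return dim(n - 1, r, c, count)
--         else:
--             return dim(n - 1, r, c - (2 ** (n - 1)), count + divide)
--     else:
--         if c < 2 ** (n - 1):
--             return dim(n - 1, r - (2 ** (n - 1)), c, count + divide * 2)
--         else:
--             return dim(n - 1, r - (2 ** (n - 1)), c - (2 ** (n - 1)), count + divide * 3)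
-- ===== SOURCE B (Python) =====
-- def dim(n, r, c, count):
--     # Iterative: walk the levels from n down to 1; at each level the row half
--     # contributes 2*quadrant and the column half contributes 1*quadrant,
--     # handled by two independent tests instead of nested branching.
--     for k in range(n, 0, -1):
--         half = 2 ** (k - 1)
--         if r >= half:
--             count += 2 * half * half
--             r -= half
--         if c >= half:
--             count += half * half
--             c -= half
--     return count
-- ===== Notes on version B (the rewrite author's own statement) =====
-- stated objective: simpler
-- what changed: Replaces the four-way nested tail recursion by a flat iterative loop over levels with two independent half-tests (row adds 2*quadrant, column adds 1*quadrant), removing recursion and the nested branch structure.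
import Mathlib
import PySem

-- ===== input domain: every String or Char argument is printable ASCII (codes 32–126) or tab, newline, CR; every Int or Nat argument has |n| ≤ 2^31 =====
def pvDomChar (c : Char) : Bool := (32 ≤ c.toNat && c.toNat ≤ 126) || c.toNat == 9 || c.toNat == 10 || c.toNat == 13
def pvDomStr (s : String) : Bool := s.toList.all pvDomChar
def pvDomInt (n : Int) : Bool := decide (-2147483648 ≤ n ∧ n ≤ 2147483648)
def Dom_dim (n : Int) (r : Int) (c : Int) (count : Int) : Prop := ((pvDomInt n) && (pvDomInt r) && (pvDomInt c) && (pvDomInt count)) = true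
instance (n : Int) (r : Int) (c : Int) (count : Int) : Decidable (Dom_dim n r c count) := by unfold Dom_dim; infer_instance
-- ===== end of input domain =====

-- B replaces A's four-way nested tail recursion by a flat loop over levels with two
-- independent half-tests (simpler decomposition, same cost).


-- ===== PORT A =====
def dim (n : Int) (r : Int) (c : Int) (count : Int) : Int :=
  if n ≤ 0 then count
  else
    let divide : Int := (2 ^ (n - 1).toNat) ^ 2
    if r < 2 ^ (n - 1).toNat then
      if c < 2 ^ (n - 1).toNat then
        dim (n - 1) r c count
      else
        dim (n - 1) r (c - 2 ^ (n - 1).toNat) (count + divide)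
    else
      if c < 2 ^ (n - 1).toNat then
        dim (n - 1) (r - 2 ^ (n - 1).toNat) c (count + divide * 2)
      else
        dim (n - 1) (r - 2 ^ (n - 1).toNat) (c - 2 ^ (n - 1).toNat) (count + divide * 3)
termination_by n.toNat
decreasing_by all_goals omega

-- ===== PORT B =====
-- one loop body: the level-k step of Source B (two independent half-tests)
def dimAltStep (st : Int × Int × Int) (k : Int) : Int × Int × Int :=
  let half : Int := 2 ^ (k - 1).toNat
  let r := st.1
  let c := st.2.1
  let count := st.2.2
  let rc : Int × Int := if r ≥ half then (r - half, count + 2 * half * half) else (r, count)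
  let cc : Int × Int := if c ≥ half then (c - half, rc.2 + half * half) else (c, rc.2)
  (rc.1, cc.1, cc.2)

def dim_alt (n : Int) (r : Int) (c : Int) (count : Int) : Int :=
  ((PySem.List.pyRange n 0 (-1)).foldl dimAltStep (r, c, count)).2.2

-- ===== PRECONDITION & SPEC =====
def Spec_dim (n : Int) (r : Int) (c : Int) (count : Int) (out : Int) : Prop := out = dim_alt n r c count
instance (n : Int) (r : Int) (c : Int) (count : Int) (out : Int) : Decidable (Spec_dim n r c count out) := by unfold Spec_dim; infer_instance

-- ===== CLAIM (what is proved, stated in full; the proofs are below) =====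
def Claim_equal_dim : Prop := ∀ (n : Int) (r : Int) (c : Int) (count : Int), Dom_dim n r c count → Spec_dim n r c count (dim n r c count)

-- ===== LEMMAS AND PROOFS =====

-- unrolling B's loop one level, for n > 0
lemma dim_alt_cons (n r c count : Int) (h : 0 < n) :
    dim_alt n r c count =
      dim_alt (n - 1) (dimAltStep (r, c, count) n).1 (dimAltStep (r, c, count) n).2.1
        (dimAltStep (r, c, count) n).2.2 := by
  unfold dim_alt
  rw [PySem.List.pyRange_neg_one_cons h, List.foldl_cons]

-- the loop is empty for n ≤ 0
lemma dim_alt_nil (n r c count : Int) (h : n ≤ 0) : dim_alt n r c count = count := by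
  unfold dim_alt
  rw [PySem.List.pyRange_neg_one_eq_nil h, List.foldl_nil]

lemma dim_eq_alt : ∀ (m : Nat) (n r c count : Int), n.toNat = m →
    dim n r c count = dim_alt n r c count := by
  intro m
  induction m with
  | zero =>
    intro n r c count hm
    have hn : n ≤ 0 := by omega
    rw [dim, if_pos hn, dim_alt_nil n r c count hn]
  | succ k ih =>
    intro n r c count hm
    have hn : 0 < n := by omega
    have hstep : (n - 1).toNat = k := by omega
    rw [dim_alt_cons n r c count hn, dim, if_neg (by omega)]
    split_ifs with h1 h2 h2
    · have hs : dimAltStep (r, c, count) n = (r, c, count) := by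
        simp only [dimAltStep, ge_iff_le]
        rw [if_neg (not_le.mpr h1), if_neg (not_le.mpr h2)]
      rw [hs]
      exact ih (n - 1) r c count hstep
    · have hs : dimAltStep (r, c, count) n =
          (r, c - 2 ^ (n - 1).toNat, count + (2 ^ (n - 1).toNat : Int) ^ 2) := by
        simp only [dimAltStep, ge_iff_le]
        rw [if_neg (not_le.mpr h1), if_pos (not_lt.mp h2)]
        simp only [Prod.mk.injEq]
        exact ⟨trivial, trivial, by ring⟩
      rw [hs]
      exact ih (n - 1) r (c - 2 ^ (n - 1).toNat) (count + (2 ^ (n - 1).toNat : Int) ^ 2) hstep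
    · have hs : dimAltStep (r, c, count) n =
          (r - 2 ^ (n - 1).toNat, c, count + (2 ^ (n - 1).toNat : Int) ^ 2 * 2) := by
        simp only [dimAltStep, ge_iff_le]
        rw [if_pos (not_lt.mp h1), if_neg (not_le.mpr h2)]
        simp only [Prod.mk.injEq]
        exact ⟨trivial, trivial, by ring⟩
      rw [hs]
      exact ih (n - 1) (r - 2 ^ (n - 1).toNat) c (count + (2 ^ (n - 1).toNat : Int) ^ 2 * 2) hstep
    · have hs : dimAltStep (r, c, count) n =
          (r - 2 ^ (n - 1).toNat, c - 2 ^ (n - 1).toNat,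
            count + (2 ^ (n - 1).toNat : Int) ^ 2 * 3) := by
        simp only [dimAltStep, ge_iff_le]
        rw [if_pos (not_lt.mp h1), if_pos (not_lt.mp h2)]
        simp only [Prod.mk.injEq]
        exact ⟨trivial, trivial, by ring⟩
      rw [hs]
      exact ih (n - 1) (r - 2 ^ (n - 1).toNat) (c - 2 ^ (n - 1).toNat)
        (count + (2 ^ (n - 1).toNat : Int) ^ 2 * 3) hstep

-- ===== VERDICT (by name: the statement is the Claim_ definition above) =====
theorem dim_spec : Claim_equal_dim := by
  intro n r c count _
  unfold Spec_dim
  exact dim_eq_alt n.toNat n r c count rfl
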